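-- pv_equiv track=rewrite | github.com/EmanueleMusumeci/LAPIS | src/costl/simulators/babyai_simulator.py | in_vicinity
-- ===== SOURCE A (Python) =====
-- from typing import Optional, Tuple, List, Set, Dict
--
-- def in_vicinity(curr_pos: Tuple, goal_pos: Tuple):
--     del_x_list = [0, 0, 1, -1]
--     del_y_list = [1, -1, 0, 0]
--     for del_x, del_y in zip(del_x_list, del_y_list):
--         new_x = curr_pos[0] + del_x
--         new_y = curr_pos[1] + del_y
--         if (new_x, new_y) == goal_pos:
--             return True
--     return False
-- ===== SOURCE B (Python) =====
-- def in_vicinity(curr_pos, goal_pos):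
--     # Closed-form Manhattan-distance test instead of A's 4-neighbor loop.
--     return abs(curr_pos[0] - goal_pos[0]) + abs(curr_pos[1] - goal_pos[1]) == 1
-- ===== Notes on version B (the rewrite author's own statement) =====
-- stated objective: simpler
-- what changed: Replaced the loop over the four orthogonal offset pairs with a closed-form Manhattan-distance test |dx|+|dy| == 1.
import Mathlib
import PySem

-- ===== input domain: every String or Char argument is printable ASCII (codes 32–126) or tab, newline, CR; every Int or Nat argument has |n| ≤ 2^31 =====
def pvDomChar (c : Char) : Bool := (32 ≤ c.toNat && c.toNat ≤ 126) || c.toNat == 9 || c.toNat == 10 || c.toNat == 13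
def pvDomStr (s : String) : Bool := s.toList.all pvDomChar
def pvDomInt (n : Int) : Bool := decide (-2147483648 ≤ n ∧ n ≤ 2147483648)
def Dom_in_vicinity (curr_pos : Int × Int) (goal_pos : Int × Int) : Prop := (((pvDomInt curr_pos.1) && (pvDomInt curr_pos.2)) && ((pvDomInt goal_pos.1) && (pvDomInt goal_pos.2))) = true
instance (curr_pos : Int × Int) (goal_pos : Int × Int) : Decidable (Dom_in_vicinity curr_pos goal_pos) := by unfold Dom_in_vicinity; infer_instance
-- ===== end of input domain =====

-- B replaces A's loop over the four orthogonal offsets by the closed-form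
-- Manhattan-distance test |dx|+|dy| = 1 (objective: simpler).

-- ===== PORT A =====
-- the 'for del_x, del_y in zip(...)' loop with early 'return True'
def in_vicinity_loop (curr_pos goal_pos : Int × Int) : List (Int × Int) → Bool
  | [] => false
  | (del_x, del_y) :: rest =>
      if (curr_pos.1 + del_x, curr_pos.2 + del_y) = goal_pos then true
      else in_vicinity_loop curr_pos goal_pos rest

def in_vicinity (curr_pos : Int × Int) (goal_pos : Int × Int) : Bool :=
  in_vicinity_loop curr_pos goal_pos
    (List.zip ([0, 0, 1, -1] : List Int) ([1, -1, 0, 0] : List Int))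

-- ===== PORT B =====
def in_vicinity_alt (curr_pos : Int × Int) (goal_pos : Int × Int) : Bool :=
  decide ((curr_pos.1 - goal_pos.1).natAbs + (curr_pos.2 - goal_pos.2).natAbs = 1)

-- ===== PRECONDITION & SPEC =====
def Spec_in_vicinity (curr_pos : Int × Int) (goal_pos : Int × Int) (out : Bool) : Prop := out = in_vicinity_alt curr_pos goal_pos
instance (curr_pos : Int × Int) (goal_pos : Int × Int) (out : Bool) : Decidable (Spec_in_vicinity curr_pos goal_pos out) := by unfold Spec_in_vicinity; infer_instance

-- ===== CLAIM (what is proved, stated in full; the proofs are below) =====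
def Claim_equal_in_vicinity : Prop := ∀ (curr_pos : Int × Int) (goal_pos : Int × Int), Dom_in_vicinity curr_pos goal_pos → Spec_in_vicinity curr_pos goal_pos (in_vicinity curr_pos goal_pos)

-- ===== LEMMAS AND PROOFS =====

-- ===== VERDICT (by name: the statement is the Claim_ definition above) =====
theorem in_vicinity_spec : Claim_equal_in_vicinity := by
  intro ⟨cx, cy⟩ ⟨gx, gy⟩ _
  unfold Spec_in_vicinity in_vicinity in_vicinity_alt
  simp only [List.zip, List.zipWith, in_vicinity_loop, Prod.mk.injEq]
  split_ifs with h1 h2 h3 h4 <;> symm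
  · rw [decide_eq_true_eq]; omega
  · rw [decide_eq_true_eq]; omega
  · rw [decide_eq_true_eq]; omega
  · rw [decide_eq_true_eq]; omega
  · rw [decide_eq_false_iff_not]; omega
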